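-- pv_equiv track=rewrite | github.com/mfaarni/maze-solver | src/maze_solver.py | draw_maze
-- ===== SOURCE A (Python) =====
-- def draw_maze(maze, visited):
--         maze_print=maze.copy()
--         move=0
--         draw_visited=[]
--
--         for i in visited:
--                 if i in draw_visited:
--                         maze_print[i[1]]=maze_print[i[1]][:i[0]]+"!"+maze_print[i[1]][i[0]+1:]
--                 else:
--                         maze_print[i[1]]=maze_print[i[1]][:i[0]]+"*"+maze_print[i[1]][i[0]+1:]
--                         draw_visited.append(i)
--                 move+=1
--         return maze_print
-- ===== SOURCE B (Python) =====
-- def draw_maze(maze, visited):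
--     counts = {}
--     for cell in visited:
--         counts[cell] = counts.get(cell, 0) + 1
--     out = maze.copy()
--     for (x, y), n in counts.items():
--         row = out[y]
--         out[y] = row[:x] + ("!" if n > 1 else "*") + row[x + 1:]
--     return out
-- ===== Notes on version B (the rewrite author's own statement) =====
-- stated objective: alternative
-- what changed: B replaces A's per-step linear membership scan of draw_visited by a frequency dict built in one pass, then writes each distinct cell exactly once ('!' if it repeats, '*' otherwise); the unused move counter is dropped.
-- outside the precondition, e.g. on draw_maze(['ab'], [(-1, 0), (-1, 0)]): A returns ['a*a!a*ab'], B returns ['a!ab']; on draw_maze(['ab'], [(5, 0), (5, 0)]): A returns ['ab*!'], B returns ['ab!']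
import Mathlib
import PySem

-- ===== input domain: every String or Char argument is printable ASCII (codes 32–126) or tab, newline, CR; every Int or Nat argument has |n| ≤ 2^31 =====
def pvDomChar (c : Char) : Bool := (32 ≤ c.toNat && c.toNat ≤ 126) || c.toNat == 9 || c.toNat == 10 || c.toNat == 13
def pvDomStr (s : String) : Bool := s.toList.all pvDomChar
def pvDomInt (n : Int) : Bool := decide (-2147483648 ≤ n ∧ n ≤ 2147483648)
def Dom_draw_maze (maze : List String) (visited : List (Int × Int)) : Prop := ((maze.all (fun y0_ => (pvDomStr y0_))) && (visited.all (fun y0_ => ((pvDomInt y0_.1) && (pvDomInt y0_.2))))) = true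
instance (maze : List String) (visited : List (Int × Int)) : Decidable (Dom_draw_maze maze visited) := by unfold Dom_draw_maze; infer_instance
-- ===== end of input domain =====

-- B builds a frequency dict of the visited cells in one pass and writes each distinct
-- cell once ('!' if it repeats, '*' otherwise), instead of A's per-step linear scan of
-- draw_visited; the unused move counter is dropped.

-- ===== PORT A =====
-- exact port of Python's  s[:x] + ch + s[x+1:]  (string slicing never raises),
-- done on the character list (String.ofList / toList; the concatenation is exact)
def pySplice (s : String) (x : Int) (ch : Char) : String :=
  String.ofList (PySem.List.slice s.toList none (some x) ++ ch :: PySem.List.slice s.toList (some (x + 1)) none)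

def draw_maze (maze : List String) (visited : List (Int × Int)) : List String :=
  -- maze_print=maze.copy(); draw_visited=[]; for i in visited: … (move is dead state, omitted)
  (visited.foldl (fun st i =>
      if i ∈ st.2 then
        (PySem.List.pySetD st.1 i.2 (pySplice (PySem.List.pyGetD st.1 i.2 "") i.1 '!'), st.2)
      else
        (PySem.List.pySetD st.1 i.2 (pySplice (PySem.List.pyGetD st.1 i.2 "") i.1 '*'), st.2 ++ [i]))
    (maze, ([] : List (Int × Int)))).1

-- ===== PORT B =====
def draw_maze_alt (maze : List String) (visited : List (Int × Int)) : List String :=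
  -- counts = {}; for cell in visited: counts[cell] = counts.get(cell, 0) + 1
  let counts := visited.foldl (fun d cell => d.insert cell (d.getD cell 0 + 1))
    (PySem.Dict.empty : PySem.Dict (Int × Int) Int)
  -- out = maze.copy(); for (x, y), n in counts.items(): out[y] = row[:x] + (…) + row[x+1:]
  counts.items.foldl (fun out p =>
      PySem.List.pySetD out p.1.2
        (pySplice (PySem.List.pyGetD out p.1.2 "") p.1.1 (if p.2 > 1 then '!' else '*')))
    maze

-- ===== PRECONDITION & SPEC =====
-- every visited coordinate addresses an actual cell: 0 ≤ y < rows and 0 ≤ x < |row y|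
def CleanCoords (maze : List String) (visited : List (Int × Int)) : Prop :=
  ∀ i ∈ visited, 0 ≤ i.2 ∧ i.2 < (maze.length : Int) ∧ 0 ≤ i.1 ∧
    i.1 < (((maze.getD i.2.toNat "").toList.length : Nat) : Int)
-- Pre_ excludes (a) row indices outside Python's list range, where A raises IndexError,
-- and (b) inputs where some visited cell repeats AND some coordinate lies outside the
-- 0 ≤ x < |row|, 0 ≤ y < rows box: there Python's slice clamping and negative-index
-- wraparound make the repeated splices insert, shift or duplicate characters depending
-- on the visiting order — an accidental corner no caller would specify, where B marks
-- the cells the natural way.  (With no repeated cell, or with all coordinates in the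
-- box, A = B is proved below, including wraparound and clamping.)
def Pre_draw_maze (maze : List String) (visited : List (Int × Int)) : Prop :=
  (∀ i ∈ visited, -(maze.length : Int) ≤ i.2 ∧ i.2 < (maze.length : Int)) ∧
  (visited.Nodup ∨ CleanCoords maze visited)
instance (maze : List String) (visited : List (Int × Int)) : Decidable (Pre_draw_maze maze visited) := by unfold Pre_draw_maze CleanCoords; infer_instance

def pvWitness_draw_maze : List String × (List (Int × Int)) :=
  (["##", "#."], [(0, 0), (1, 1), (0, 0)])

def Spec_draw_maze (maze : List String) (visited : List (Int × Int)) (out : List String) : Prop := out = draw_maze_alt maze visited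
instance (maze : List String) (visited : List (Int × Int)) (out : List String) : Decidable (Spec_draw_maze maze visited out) := by unfold Spec_draw_maze; infer_instance

-- ===== CLAIM (what is proved, stated in full; the proofs are below) =====
def Claim_equal_draw_maze : Prop := ∀ (maze : List String) (visited : List (Int × Int)), Dom_draw_maze maze visited → Pre_draw_maze maze visited → Spec_draw_maze maze visited (draw_maze maze visited)

-- ===== LEMMAS AND PROOFS =====

-- the shape of a maze: the list of row lengths
def mzShape (M : List String) : List Nat := M.map (fun s => s.toList.length)

-- an in-range coordinate (x, y) w.r.t. a shape
def InR (sh : List Nat) (i : Int × Int) : Prop :=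
  0 ≤ i.2 ∧ i.2 < (sh.length : Int) ∧ 0 ≤ i.1 ∧ i.1 < ((sh.getD i.2.toNat 0 : Nat) : Int)

-- the single in-place write both ports perform
def wr (M : List String) (x y : Int) (ch : Char) : List String :=
  PySem.List.pySetD M y (pySplice (PySem.List.pyGetD M y "") x ch)

-- the character at row r, column c
def charAt (M : List String) (r c : Nat) : Option Char := M[r]?.bind (fun s => s.toList[c]?)

lemma shape_getD (M : List String) (n : Nat) (h : n < M.length) :
    (mzShape M).getD n 0 = (M.getD n "").toList.length := by
  simp [mzShape, List.getD, h]

lemma InR_elim (M : List String) (x y : Int) (h : InR (mzShape M) (x, y)) :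
    0 ≤ y ∧ y.toNat < M.length ∧ 0 ≤ x ∧ x.toNat < (M.getD y.toNat "").toList.length := by
  obtain ⟨hy0, hy1, hx0, hx1⟩ := h
  simp only [mzShape, List.length_map] at hy1
  have hy0' : (0:Int) ≤ y := hy0
  have hx0' : (0:Int) ≤ x := hx0
  have hyn : y.toNat < M.length := by omega
  rw [show ((x,y).2 : Int).toNat = y.toNat from rfl, shape_getD M y.toNat hyn] at hx1
  exact ⟨hy0', hyn, hx0', by omega⟩

lemma wr_eq_set (M : List String) (x y : Int) (ch : Char) (h : InR (mzShape M) (x, y)) :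
    wr M x y ch = M.set y.toNat (String.ofList ((M.getD y.toNat "").toList.set x.toNat ch)) := by
  obtain ⟨hy0, hyn, hx0, hxn⟩ := InR_elim M x y h
  unfold wr pySplice
  rw [PySem.List.pySetD_of_nonneg M _ hy0, PySem.List.pyGetD_eq_getElem M "" hy0 (by omega)]
  rw [PySem.List.slice_to _ hx0, PySem.List.slice_from _ (by omega : (0:Int) ≤ x + 1)]
  have hx1 : ((x + 1).toNat) = x.toNat + 1 := by omega
  rw [hx1, List.set_eq_take_cons_drop ch hxn]
  congr 2 <;> simp [List.getD, List.getElem?_eq_getElem hyn]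

lemma mzShape_wr (M : List String) (x y : Int) (ch : Char) (h : InR (mzShape M) (x, y)) :
    mzShape (wr M x y ch) = mzShape M := by
  obtain ⟨hy0, hyn, hx0, hxn⟩ := InR_elim M x y h
  rw [wr_eq_set M x y ch h]
  unfold mzShape
  rw [List.map_set]
  apply List.ext_getElem (by simp)
  intro n h1 h2
  rw [List.getElem_set]
  split
  · next hn =>
      subst hn
      simp [List.getD, List.getElem?_eq_getElem hyn]
  · rfl

lemma charAt_wr (M : List String) (x y : Int) (ch : Char) (h : InR (mzShape M) (x, y)) (r c : Nat) :
    charAt (wr M x y ch) r c =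
      if (r : Int) = y ∧ (c : Int) = x then some ch else charAt M r c := by
  obtain ⟨hy0, hyn, hx0, hxn⟩ := InR_elim M x y h
  rw [wr_eq_set M x y ch h]
  unfold charAt
  rw [List.getElem?_set]
  by_cases hr : r = y.toNat
  · subst hr
    simp only [hyn, if_pos]
    rw [List.getElem?_eq_getElem hyn]
    have hxn' : x.toNat < M[y.toNat].toList.length := by
      simpa [List.getD, List.getElem?_eq_getElem hyn] using hxn
    have hyy : ((y.toNat : Int)) = y := by omega
    by_cases hc : c = x.toNat
    · subst hc
      have hxx : ((x.toNat : Int)) = x := by omega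
      simp only [List.getD, List.getElem?_eq_getElem hyn, Option.getD_some]
      have hxn'' : x.toNat < M[y.toNat].length := by simpa using hxn'
      simp [hyy, hxx, List.getElem?_set, hxn'']
    · have hcx : ¬ ((c:Int) = x) := by omega
      simp only [List.getD, List.getElem?_eq_getElem hyn, Option.getD_some]
      simp [hyy, hcx, List.getElem?_set, show ¬ (x.toNat = c) from fun hh => hc hh.symm]
  · have hne : ¬ ((r:Int) = y ∧ (c:Int) = x) := by omega
    simp [hne, show ¬ (y.toNat = r) from fun hh => hr hh.symm]

lemma ext_of_charAt (M N : List String) (hsh : mzShape M = mzShape N)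
    (h : ∀ r c, charAt M r c = charAt N r c) : M = N := by
  have hlen : M.length = N.length := by
    have := congrArg List.length hsh; simpa [mzShape] using this
  apply List.ext_getElem hlen
  intro r h1 h2
  have hrow : M[r].toList.length = N[r].toList.length := by
    have := congrArg (fun l => l.getD r 0) hsh
    simpa [mzShape, List.getD, List.getElem?_eq_getElem, h1, h2] using this
  have : M[r].toList = N[r].toList := by
    apply List.ext_getElem hrow
    intro c hc1 hc2
    have hthis := h r c
    unfold charAt at hthis
    rw [List.getElem?_eq_getElem h1, List.getElem?_eq_getElem h2] at hthis
    simp only [Option.bind_some] at hthis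
    rw [List.getElem?_eq_getElem hc1, List.getElem?_eq_getElem hc2] at hthis
    exact Option.some_inj.mp hthis
  exact String.toList_inj.mp this

-- ---- A side: the loop body of draw_maze, named ----
def stepA (st : List String × List (Int × Int)) (i : Int × Int) : List String × List (Int × Int) :=
  if i ∈ st.2 then
    (PySem.List.pySetD st.1 i.2 (pySplice (PySem.List.pyGetD st.1 i.2 "") i.1 '!'), st.2)
  else
    (PySem.List.pySetD st.1 i.2 (pySplice (PySem.List.pyGetD st.1 i.2 "") i.1 '*'), st.2 ++ [i])

lemma foldA_snd_mem (v : List (Int × Int)) (st : List String × List (Int × Int)) (j : Int × Int) :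
    j ∈ (v.foldl stepA st).2 ↔ j ∈ st.2 ∨ j ∈ v := by
  induction v generalizing st with
  | nil => simp
  | cons i v ih =>
      rw [List.foldl_cons, ih]
      by_cases hj : j = i
      · subst hj
        by_cases hm : j ∈ st.2 <;> simp [stepA, hm]
      · by_cases hm : i ∈ st.2 <;> simp [stepA, hm, hj] <;> tauto

lemma foldA_concat (v : List (Int × Int)) (i : Int × Int) (maze : List String) :
    ((v ++ [i]).foldl stepA (maze, [])).1 =
      wr ((v.foldl stepA (maze, [])).1) i.1 i.2 (if i ∈ v then '!' else '*') := by
  rw [List.foldl_append, List.foldl_cons, List.foldl_nil]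
  have hmem : i ∈ (v.foldl stepA (maze, [])).2 ↔ i ∈ v := by
    rw [foldA_snd_mem]; simp
  by_cases hm : i ∈ v
  · simp [stepA, hmem.mpr hm, hm, wr]
  · have hnm : i ∉ (v.foldl stepA (maze, [])).2 := fun hh => hm (hmem.mp hh)
    rw [if_neg hm]
    show (stepA _ i).1 = _
    rw [stepA, if_neg hnm]
    rfl

-- the final maze of A's loop, pointwise: the last write at a repeated cell is '!'
lemma A_point (maze : List String) (v : List (Int × Int))
    (hpre : ∀ i ∈ v, InR (mzShape maze) i) :
    mzShape ((v.foldl stepA (maze, [])).1) = mzShape maze ∧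
    ∀ r c : Nat, charAt ((v.foldl stepA (maze, [])).1) r c =
      if ((c : Int), (r : Int)) ∈ v then
        some (if 1 < v.count ((c : Int), (r : Int)) then '!' else '*')
      else charAt maze r c := by
  induction v using List.reverseRecOn with
  | nil => simp
  | append_singleton v i ih =>
      have hpv : ∀ j ∈ v, InR (mzShape maze) j := fun j hj => hpre j (by simp [hj])
      obtain ⟨ihs, ihc⟩ := ih hpv
      have hiR : InR (mzShape ((v.foldl stepA (maze, [])).1)) (i.1, i.2) := by
        rw [ihs]; exact hpre i (by simp)
      constructor
      · rw [foldA_concat, mzShape_wr _ _ _ _ hiR, ihs]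
      · intro r c
        rw [foldA_concat, charAt_wr _ _ _ _ hiR r c]
        by_cases hrc : (r : Int) = i.2 ∧ (c : Int) = i.1
        · have hic : ((c : Int), (r : Int)) = i := by
            obtain ⟨h1, h2⟩ := hrc; exact Prod.ext h2 h1
          rw [if_pos hrc, hic]
          have hcnt : (v ++ [i]).count i = v.count i + 1 := by simp
          by_cases hm : i ∈ v
          · have : 0 < v.count i := List.count_pos_iff.mpr hm
            simp only [hcnt, List.mem_append, hm, true_or, if_pos]
            have h1 : 1 < v.count i + 1 := by omega
            simp [h1, hm]
          · have : v.count i = 0 := List.count_eq_zero.mpr hm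
            simp [hcnt, this, hm]
        · have hic : ((c : Int), (r : Int)) ≠ i := by
            intro hh; apply hrc; constructor
            · exact congrArg Prod.snd hh
            · exact congrArg Prod.fst hh
          rw [if_neg hrc, ihc r c]
          have hmem : (((c:Int)), ((r:Int))) ∈ v ++ [i] ↔ ((c:Int), (r:Int)) ∈ v := by
            simp [hic]
          have hcc : (v ++ [i]).count ((c:Int), (r:Int)) = v.count ((c:Int), (r:Int)) := by
            have h0 : List.count ((c:Int), (r:Int)) [i] = 0 := List.count_eq_zero.mpr (by simp [hic])
            simp [List.count_append, h0]
          rw [hcc]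
          by_cases hm : ((c:Int), (r:Int)) ∈ v
          · rw [if_pos hm, if_pos (hmem.mpr hm)]
          · rw [if_neg hm, if_neg (fun hh => hm (hmem.mp hh))]

-- ---- B side: a write pass over distinct cells, pointwise ----
lemma B_point (maze : List String) (χ : (Int × Int) → Char) (u : List (Int × Int))
    (hnd : u.Nodup) (hpre : ∀ i ∈ u, InR (mzShape maze) i) :
    mzShape (u.foldl (fun M k => wr M k.1 k.2 (χ k)) maze) = mzShape maze ∧
    ∀ r c : Nat, charAt (u.foldl (fun M k => wr M k.1 k.2 (χ k)) maze) r c =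
      if ((c : Int), (r : Int)) ∈ u then some (χ ((c : Int), (r : Int))) else charAt maze r c := by
  induction u generalizing maze with
  | nil => simp
  | cons k u ih =>
      have hkR : InR (mzShape maze) (k.1, k.2) := hpre k (by simp)
      have hsh : mzShape (wr maze k.1 k.2 (χ k)) = mzShape maze := mzShape_wr _ _ _ _ hkR
      have hpre' : ∀ i ∈ u, InR (mzShape (wr maze k.1 k.2 (χ k))) i := by
        rw [hsh]; exact fun i hi => hpre i (by simp [hi])
      obtain ⟨ihs, ihc⟩ := ih (wr maze k.1 k.2 (χ k)) hnd.of_cons hpre'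
      rw [List.foldl_cons]
      refine ⟨by rw [ihs, hsh], ?_⟩
      intro r c
      rw [ihc r c, charAt_wr _ _ _ _ hkR r c]
      by_cases hm : ((c:Int), (r:Int)) ∈ u
      · have hk : ((c:Int), (r:Int)) ≠ k := fun hh => (List.nodup_cons.mp hnd).1 (hh ▸ hm)
        simp [hm, hk]
      · by_cases hrc : (r : Int) = k.2 ∧ (c : Int) = k.1
        · have hkc : ((c : Int), (r : Int)) = k := Prod.ext hrc.2 hrc.1
          simp [hm, hrc, hkc]
        · have hkc : ((c : Int), (r : Int)) ≠ k := by
            intro hh; exact hrc ⟨congrArg Prod.snd hh, congrArg Prod.fst hh⟩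
          simp [hm, hrc, hkc]

-- draw_maze_alt is the write pass over the distinct visited cells (Counter characterization)
lemma B_eq_fold (maze : List String) (v : List (Int × Int)) :
    draw_maze_alt maze v =
      (PySem.List.dedup v).foldl
        (fun M k => wr M k.1 k.2 (if 1 < v.count k then '!' else '*')) maze := by
  unfold draw_maze_alt
  rw [PySem.Dict.foldl_insert_getD_add_one_eq_counter]
  simp only [PySem.Dict.items_counter, List.foldl_map, PySem.List.dedup_eq_ofList]
  apply List.foldl_ext
  intro M k _
  unfold wr
  by_cases h : 1 < v.count k
  · rw [if_pos (by exact_mod_cast h), if_pos h]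
  · rw [if_neg (by exact_mod_cast h), if_neg h]

-- ---- the duplicate-free case: A and B perform the identical write sequence ----
lemma foldA_nodup (v : List (Int × Int)) (d : List (Int × Int)) (M : List String)
    (hd : ∀ i ∈ v, i ∉ d) (hnd : v.Nodup) :
    (v.foldl stepA (M, d)).1 = v.foldl (fun N k => wr N k.1 k.2 '*') M := by
  induction v generalizing M d with
  | nil => rfl
  | cons i v ih =>
      rw [List.foldl_cons, List.foldl_cons]
      have hni : i ∉ d := hd i (by simp)
      have hstep : stepA (M, d) i = (wr M i.1 i.2 '*', d ++ [i]) := by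
        rw [stepA, if_neg hni]; rfl
      rw [hstep]
      apply ih
      · intro j hj
        intro hmem
        rcases List.mem_append.mp hmem with h | h
        · exact hd j (by simp [hj]) h
        · exact (List.nodup_cons.mp hnd).1 ((List.mem_singleton.mp h) ▸ hj)
      · exact hnd.of_cons

lemma B_nodup (maze : List String) (v : List (Int × Int)) (hnd : v.Nodup) :
    draw_maze_alt maze v = v.foldl (fun N k => wr N k.1 k.2 '*') maze := by
  rw [B_eq_fold]
  rw [show PySem.List.dedup v = v from by
    rw [PySem.List.dedup_eq_ofList]; exact PySem.Set.ofList_eq_self_of_nodup v hnd]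
  apply PySem.List.foldl_congr_mem
  intro N k hk
  have h1 : v.count k ≤ 1 := List.nodup_iff_count_le_one.mp hnd k
  rw [if_neg (by omega)]

lemma draw_maze_eq_alt_clean (maze : List String) (v : List (Int × Int))
    (hpre : CleanCoords maze v) : draw_maze maze v = draw_maze_alt maze v := by
  have hpre' : ∀ i ∈ v, InR (mzShape maze) i := by
    intro i hi
    obtain ⟨h1, h2, h3, h4⟩ := hpre i hi
    refine ⟨h1, by simpa [mzShape] using h2, h3, ?_⟩
    rw [shape_getD maze i.2.toNat (by omega)]
    exact h4
  have hA : draw_maze maze v = (v.foldl stepA (maze, [])).1 := rfl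
  obtain ⟨hAs, hAc⟩ := A_point maze v hpre'
  have hnd := PySem.List.nodup_dedup v
  have hpre'' : ∀ i ∈ PySem.List.dedup v, InR (mzShape maze) i := fun i hi =>
    hpre' i ((PySem.List.mem_dedup v i).mp hi)
  obtain ⟨hBs, hBc⟩ := B_point maze (fun k => if 1 < v.count k then '!' else '*')
    (PySem.List.dedup v) hnd hpre''
  rw [hA, B_eq_fold]
  apply ext_of_charAt
  · rw [hAs, hBs]
  · intro r c
    rw [hAc r c, hBc r c]
    by_cases hm : ((c:Int), (r:Int)) ∈ v
    · rw [if_pos hm, if_pos ((PySem.List.mem_dedup v _).mpr hm)]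
    · rw [if_neg hm, if_neg (fun hh => hm ((PySem.List.mem_dedup v _).mp hh))]

lemma draw_maze_eq_alt (maze : List String) (v : List (Int × Int))
    (hpre : Pre_draw_maze maze v) : draw_maze maze v = draw_maze_alt maze v := by
  rcases hpre.2 with hnd | hclean
  · have hA : draw_maze maze v = (v.foldl stepA (maze, [])).1 := rfl
    rw [hA, foldA_nodup v [] maze (by simp) hnd, B_nodup maze v hnd]
  · exact draw_maze_eq_alt_clean maze v hclean

-- ===== VERDICT (by name: the statement is the Claim_ definition above) =====
theorem draw_maze_spec : Claim_equal_draw_maze := by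
  intro maze v _ hpre
  unfold Spec_draw_maze
  exact draw_maze_eq_alt maze v hpre
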